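-- pv_equiv track=rewrite | github.com/kaestro/algorithms_v3 | contests/Codeforces Round 927 (Div. 3)/Chaya Calendar.py | apocalypse_year
-- ===== SOURCE A (Python) =====
-- def apocalypse_year(periodicities: list[int]) -> int:
--     current_year = 0
--     for periodicity in periodicities:
--         next_year = periodicity
--         while next_year <= current_year:
--             next_year += periodicity
--         current_year = next_year
--
--     return current_year
-- ===== SOURCE B (Python) =====
-- def apocalypse_year(periodicities: list[int]) -> int:
--     current_year = 0
--     for p in periodicities:
--         current_year = (current_year // p + 1) * p
--     return current_year
-- ===== Notes on version B (the rewrite author's own statement) =====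
-- stated objective: faster
-- what changed: The inner while-loop that repeatedly adds the periodicity until exceeding current_year is replaced by one floor-division formula (current//p + 1)*p per element; intended as faster (O(n) steps vs unbounded repeated addition) — a timing run saw A time out at n=16 where B returned, so no clean ratio was measurable.
import Mathlib
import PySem

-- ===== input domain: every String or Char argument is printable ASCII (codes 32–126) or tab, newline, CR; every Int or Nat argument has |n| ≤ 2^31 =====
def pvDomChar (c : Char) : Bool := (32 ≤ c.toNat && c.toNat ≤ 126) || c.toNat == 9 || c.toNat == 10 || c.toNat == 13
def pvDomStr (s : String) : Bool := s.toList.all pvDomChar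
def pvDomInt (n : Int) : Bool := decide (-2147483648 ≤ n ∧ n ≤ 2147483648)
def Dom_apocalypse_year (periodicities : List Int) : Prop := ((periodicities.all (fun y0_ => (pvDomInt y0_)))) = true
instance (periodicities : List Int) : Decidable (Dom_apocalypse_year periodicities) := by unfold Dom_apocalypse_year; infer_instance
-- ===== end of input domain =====

-- B replaces A's inner while-loop (repeatedly adding the periodicity) by one
-- floor-division formula per element; return-value equivalence on positive periodicities.

-- ===== PORT A =====
-- the inner 'while next_year <= current_year: next_year += periodicity' loop;
-- the '0 < p' guard only makes the recursion total (Python diverges when p ≤ 0,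
-- which Pre_ excludes)
def whileBump (p cur next : Int) : Int :=
  if _h : next ≤ cur ∧ 0 < p then whileBump p cur (next + p) else next
termination_by (cur + 1 - next).toNat
decreasing_by omega

def apocalypse_year (periodicities : List Int) : Int :=
  periodicities.foldl (fun current_year periodicity =>
    whileBump periodicity current_year periodicity) 0

-- ===== PORT B =====
def apocalypse_year_alt (periodicities : List Int) : Int :=
  periodicities.foldl (fun current_year p =>
    (PySem.Int.floordiv current_year p + 1) * p) 0

-- ===== PRECONDITION & SPEC =====
-- Pre_ excludes nonpositive periodicities, on which Python A's inner while-loop never terminates.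
def Pre_apocalypse_year (periodicities : List Int) : Prop :=
  ∀ p ∈ periodicities, 0 < p
instance (periodicities : List Int) : Decidable (Pre_apocalypse_year periodicities) := by
  unfold Pre_apocalypse_year; infer_instance
def pvWitness_apocalypse_year : List Int := [2, 3, 5]

def Spec_apocalypse_year (periodicities : List Int) (out : Int) : Prop := out = apocalypse_year_alt periodicities
instance (periodicities : List Int) (out : Int) : Decidable (Spec_apocalypse_year periodicities out) := by unfold Spec_apocalypse_year; infer_instance

-- ===== CLAIM (what is proved, stated in full; the proofs are below) =====
def Claim_equal_apocalypse_year : Prop := ∀ (periodicities : List Int), Dom_apocalypse_year periodicities → Pre_apocalypse_year periodicities → Spec_apocalypse_year periodicities (apocalypse_year periodicities)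

-- ===== LEMMAS AND PROOFS =====

-- closed form of the while-loop, by induction on the number of iterations
theorem whileBump_closed (p : Int) (hp : 0 < p) :
    ∀ (n : Nat) (cur next : Int), (cur + 1 - next).toNat = n →
      whileBump p cur next = if next ≤ cur then next + p * ((cur - next) / p + 1) else next := by
  intro n
  induction n using Nat.strong_induction_on with
  | _ n ih =>
    intro cur next hn
    rw [whileBump]
    by_cases h : next ≤ cur
    · simp only [h, hp, and_true, dif_pos, if_pos]
      have hrec := ih (cur + 1 - (next + p)).toNat (by omega) cur (next + p) rfl
      rw [hrec]
      by_cases h2 : next + p ≤ cur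
      · rw [if_pos h2]
        have e1 : cur - (next + p) = cur - next - p := by ring
        have e2 : cur - next = (cur - next - p) + 1 * p := by ring
        rw [e1, e2, Int.add_mul_ediv_right _ _ (by omega : p ≠ 0)]
        ring
      · rw [if_neg h2]
        have : (cur - next) / p = 0 := Int.ediv_eq_zero_of_lt (by omega) (by omega)
        rw [this]; ring
    · simp [h]

theorem whileBump_step (p cur : Int) (hp : 0 < p) (hc : 0 ≤ cur) :
    whileBump p cur p = (PySem.Int.floordiv cur p + 1) * p := by
  rw [PySem.Int.floordiv_eq_ediv_of_pos hp,
      whileBump_closed p hp (cur + 1 - p).toNat cur p rfl]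
  by_cases h : p ≤ cur
  · rw [if_pos h]
    have : cur = (cur - p) + 1 * p := by ring
    conv_rhs => rw [this, Int.add_mul_ediv_right _ _ (by omega : p ≠ 0)]
    ring
  · rw [if_neg h]
    have : cur / p = 0 := Int.ediv_eq_zero_of_lt hc (by omega)
    rw [this]; ring

theorem fold_eq : ∀ (l : List Int) (acc : Int), (∀ p ∈ l, 0 < p) → 0 ≤ acc →
    l.foldl (fun current_year periodicity => whileBump periodicity current_year periodicity) acc
      = l.foldl (fun current_year p => (PySem.Int.floordiv current_year p + 1) * p) acc := by
  intro l
  induction l with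
  | nil => intro acc _ _; rfl
  | cons p t ih =>
    intro acc hpos hacc
    have hp : 0 < p := hpos p (List.mem_cons_self ..)
    simp only [List.foldl_cons]
    rw [whileBump_step p acc hp hacc]
    refine ih _ (fun q hq => hpos q (List.mem_cons_of_mem _ hq)) ?_
    rw [PySem.Int.floordiv_eq_ediv_of_pos hp]
    have : 0 ≤ acc / p := Int.ediv_nonneg hacc (le_of_lt hp)
    nlinarith

-- ===== VERDICT (by name: the statement is the Claim_ definition above) =====
theorem apocalypse_year_spec : Claim_equal_apocalypse_year := by
  intro l _ hpre
  unfold Spec_apocalypse_year apocalypse_year apocalypse_year_alt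
  exact fold_eq l 0 hpre le_rfl
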